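-- pv_equiv track=rewrite | github.com/cypher9/Fuxenpruefung | src/fuxenpruefung.py | change_catagories
-- ===== SOURCE A (Python) =====
-- def change_catagories(category, category_update):
--     for key in category_update.keys():
--         try:
--             idx = list(map(lambda a: a[2], category)).index(key)
--         except ValueError:
--             continue
--         category[idx][0] = category_update[key]
--     return category
-- ===== SOURCE B (Python) =====
-- def change_catagories(category, category_update):
--     # Single forward pass over category; mutates rows in place like the original.
--     seen = set()
--     for item in category:
--         if len(item) > 2:
--             key = item[2]
--             if key in category_update and key not in seen:
--                 item[0] = category_update[key]
--                 seen.add(key)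
--     return category
-- ===== Notes on version B (the rewrite author's own statement) =====
-- stated objective: idiomatic
-- what changed: B replaces A's outer loop over update keys with its quadratic inner list.index scan by one forward pass over category, using the dict as a direct lookup and a 'seen' set to keep first-match-only semantics.
import Mathlib
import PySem

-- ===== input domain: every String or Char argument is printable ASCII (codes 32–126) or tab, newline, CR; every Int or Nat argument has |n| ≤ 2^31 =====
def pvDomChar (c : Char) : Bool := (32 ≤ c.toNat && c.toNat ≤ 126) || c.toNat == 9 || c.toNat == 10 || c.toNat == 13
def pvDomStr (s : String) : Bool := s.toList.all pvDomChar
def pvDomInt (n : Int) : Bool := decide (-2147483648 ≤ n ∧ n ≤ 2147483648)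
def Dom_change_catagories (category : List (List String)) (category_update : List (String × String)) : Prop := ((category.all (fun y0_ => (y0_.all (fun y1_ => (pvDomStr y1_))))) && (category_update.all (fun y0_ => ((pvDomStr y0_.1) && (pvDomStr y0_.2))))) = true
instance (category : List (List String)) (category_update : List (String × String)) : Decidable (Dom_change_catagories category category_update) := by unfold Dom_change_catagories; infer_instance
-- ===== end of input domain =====

-- B is a single forward pass over category with a dict lookup and a 'seen' set instead of
-- A's loop over update keys with an inner list.index scan; return-value equivalence only
-- (both Pythons mutate the rows of category in place the same way).

-- ===== PORT A =====
def change_catagories (category : List (List String)) (category_update : List (String × String)) : List (List String) :=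
  let d := PySem.Dict.ofList category_update
  d.keys.foldl (fun cat key =>
    match PySem.List.index? (cat.map (fun a => PySem.List.pyGetD a 2 "")) key with
    | none => cat
    | some idx => cat.set idx (PySem.List.pySetD (PySem.List.pyGetD cat (idx : Int) []) 0 (d.getD key ""))) category

-- ===== PORT B =====
-- the for-loop of Source B as structural recursion over category, threading the 'seen' set
def goCC (d : PySem.Dict String String) : List (List String) → PySem.Set String → List (List String)
  | [], _ => []
  | item :: rest, seen =>
    if 2 < item.length then
      let key := PySem.List.pyGetD item 2 ""
      if d.contains key && !(PySem.Set.contains seen key) then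
        PySem.List.pySetD item 0 (d.getD key "") :: goCC d rest (PySem.Set.add seen key)
      else item :: goCC d rest seen
    else item :: goCC d rest seen

def change_catagories_alt (category : List (List String)) (category_update : List (String × String)) : List (List String) :=
  goCC (PySem.Dict.ofList category_update) category PySem.Set.empty

-- ===== PRECONDITION & SPEC =====
-- Pre_ excludes exactly the inputs on which A raises IndexError: a non-empty update dict
-- together with a row of fewer than 3 elements (the map a[2] is forced on the first key).
def Pre_change_catagories (category : List (List String)) (category_update : List (String × String)) : Prop :=
  category_update = [] ∨ ∀ row ∈ category, 3 ≤ row.length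
instance (category : List (List String)) (category_update : List (String × String)) : Decidable (Pre_change_catagories category category_update) := by unfold Pre_change_catagories; infer_instance

def pvWitness_change_catagories : List (List String) × (List (String × String)) :=
  ([["a", "b", "c"], ["x", "y", "z"]], [("z", "NEW")])

def Spec_change_catagories (category : List (List String)) (category_update : List (String × String)) (out : List (List String)) : Prop := out = change_catagories_alt category category_update
instance (category : List (List String)) (category_update : List (String × String)) (out : List (List String)) : Decidable (Spec_change_catagories category category_update out) := by unfold Spec_change_catagories; infer_instance

-- ===== CLAIM (what is proved, stated in full; the proofs are below) =====
def Claim_equal_change_catagories : Prop := ∀ (category : List (List String)) (category_update : List (String × String)), Dom_change_catagories category category_update → Pre_change_catagories category category_update → Spec_change_catagories category category_update (change_catagories category category_update)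


-- ===== LEMMAS AND PROOFS =====

-- the loop body of A, named for the proofs
def applyKey (d : PySem.Dict String String) (cat : List (List String)) (key : String) : List (List String) :=
  match PySem.List.index? (cat.map (fun a => PySem.List.pyGetD a 2 "")) key with
  | none => cat
  | some idx => cat.set idx (PySem.List.pySetD (PySem.List.pyGetD cat (idx : Int) []) 0 (d.getD key ""))

-- the projection row |-> row[2] (totalised), invariant under writing row[0]
def projCC (row : List String) : String := PySem.List.pyGetD row 2 ""

theorem changeA_eq_foldl (cat : List (List String)) (upd : List (String × String)) :
    change_catagories cat upd =
      (PySem.Dict.ofList upd).keys.foldl (applyKey (PySem.Dict.ofList upd)) cat := rfl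

theorem projCC_pySetD (row : List String) (v : String) :
    projCC (PySem.List.pySetD row 0 v) = projCC row := by
  cases row with
  | nil => rfl
  | cons x xs =>
    by_cases hx : 2 ≤ xs.length <;>
      simp [projCC, PySem.List.pySetD, PySem.List.pySet?, PySem.List.pyIdx?,
        PySem.List.pyGetD, PySem.List.pyGet?, hx]

theorem pySetD_pySetD (row : List String) (v : String) :
    PySem.List.pySetD (PySem.List.pySetD row 0 v) 0 v = PySem.List.pySetD row 0 v := by
  cases row with
  | nil => rfl
  | cons x xs => simp [PySem.List.pySetD, PySem.List.pySet?, PySem.List.pyIdx?]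

theorem applyKey_cons_eq (d : PySem.Dict String String) (row : List String)
    (rest : List (List String)) (key : String) (h : projCC row = key) :
    applyKey d (row :: rest) key = PySem.List.pySetD row 0 (d.getD key "") :: rest := by
  unfold applyKey
  rw [List.map_cons, show PySem.List.pyGetD row 2 "" = key from h, PySem.List.index?_cons_self]
  simp

theorem applyKey_cons_ne (d : PySem.Dict String String) (row : List String)
    (rest : List (List String)) (key : String) (h : projCC row ≠ key) :
    applyKey d (row :: rest) key = row :: applyKey d rest key := by
  unfold applyKey
  rw [List.map_cons, PySem.List.index?_cons_of_ne _ (show PySem.List.pyGetD row 2 "" ≠ key from h)]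
  cases hidx : PySem.List.index? (rest.map (fun a => PySem.List.pyGetD a 2 "")) key with
  | none => simp
  | some i =>
    simp only [Option.map_some]
    simp only [PySem.List.pyGetD_natCast, List.getD_cons_succ, List.set_cons_succ]

theorem applyKey_nil (d : PySem.Dict String String) (key : String) :
    applyKey d [] key = [] := by
  simp [applyKey, PySem.List.index?]

theorem foldl_applyKey_nil (d : PySem.Dict String String) (K : List String) :
    K.foldl (applyKey d) [] = [] := by
  induction K with
  | nil => rfl
  | cons k K ih => simpa [applyKey_nil] using ih

theorem foldl_applyKey_cons (d : PySem.Dict String String) (K : List String)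
    (row : List String) (rest : List (List String)) :
    K.foldl (applyKey d) (row :: rest) =
      (if projCC row ∈ K then PySem.List.pySetD row 0 (d.getD (projCC row) "") else row) ::
        (K.filter (fun k => !(k == projCC row))).foldl (applyKey d) rest := by
  induction K generalizing row rest with
  | nil => simp
  | cons k K ih =>
    simp only [List.foldl_cons]
    by_cases h : projCC row = k
    · subst h
      rw [applyKey_cons_eq d row rest _ rfl, ih, projCC_pySetD]
      by_cases hk : projCC row ∈ K <;>
        simp [hk, pySetD_pySetD]
    · rw [applyKey_cons_ne d row rest _ h, ih]
      have hbeq : (k == projCC row) = false := by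
        simp only [beq_eq_false_iff_ne]; exact fun hkk => h hkk.symm
      simp [hbeq, List.mem_cons, h]

theorem goCC_of_no_key (d : PySem.Dict String String)
    (hd : ∀ k, d.contains k = false) :
    ∀ (cat : List (List String)) (seen : PySem.Set String), goCC d cat seen = cat := by
  intro cat
  induction cat with
  | nil => intro seen; rfl
  | cons row rest ih =>
    intro seen
    simp [goCC, hd, ih]

theorem foldl_applyKey_eq_goCC (d : PySem.Dict String String) :
    ∀ (cat : List (List String)) (K : List String) (seen : PySem.Set String),
      (∀ row ∈ cat, 3 ≤ row.length) →
      (∀ k : String, k ∈ K ↔ (d.contains k = true ∧ k ∉ seen)) →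
      K.foldl (applyKey d) cat = goCC d cat seen := by
  intro cat
  induction cat with
  | nil => intro K seen _ _; exact foldl_applyKey_nil d K
  | cons row rest ih =>
    intro K seen hlen hK
    have hrow : 3 ≤ row.length := hlen row (by simp)
    have h2 : 2 < row.length := by omega
    have hlen' : ∀ r ∈ rest, 3 ≤ r.length := fun r hr => hlen r (List.mem_cons_of_mem _ hr)
    rw [foldl_applyKey_cons]
    simp only [goCC, if_pos h2]
    rw [show PySem.List.pyGetD row 2 "" = projCC row from rfl]
    cases hcb : PySem.Set.contains seen (projCC row) with
    | true =>
      have hseen : projCC row ∈ seen := (PySem.Set.contains_iff _ _).mp hcb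
      have hnotK : projCC row ∉ K := fun hx => ((hK _).mp hx).2 hseen
      rw [if_neg hnotK]
      simp only [Bool.not_true, Bool.and_false, Bool.false_eq_true, if_false]

      congr 1
      apply ih _ seen hlen'
      intro k
      rw [List.mem_filter, hK k]
      constructor
      · rintro ⟨⟨hdk, hks⟩, -⟩; exact ⟨hdk, hks⟩
      · rintro ⟨hdk, hks⟩
        refine ⟨⟨hdk, hks⟩, ?_⟩
        simp only [Bool.not_eq_true', beq_eq_false_iff_ne]
        exact fun hkk => hks (by rw [hkk]; exact hseen)
    | false =>
      have hseen : projCC row ∉ seen := fun hx => by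
        rw [(PySem.Set.contains_iff _ _).mpr hx] at hcb; cases hcb
      cases hdb : d.contains (projCC row) with
      | true =>
        have hinK : projCC row ∈ K := (hK _).mpr ⟨hdb, hseen⟩
        rw [if_pos hinK]
        simp only [Bool.not_false, Bool.and_self]
        rw [if_pos trivial]
        congr 1
        apply ih _ _ hlen'
        intro k
        rw [List.mem_filter, hK k]
        constructor
        · rintro ⟨⟨hdk, hks⟩, hb⟩
          have hne : k ≠ projCC row := by
            simpa only [Bool.not_eq_true', beq_eq_false_iff_ne] using hb
          refine ⟨hdk, fun hmem => ?_⟩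
          rcases (PySem.Set.mem_add _ _ _).mp hmem with h1 | h1
          · exact hks h1
          · exact hne h1
        · rintro ⟨hdk, hks⟩
          have hne : k ≠ projCC row :=
            fun hkk => hks ((PySem.Set.mem_add _ _ _).mpr (Or.inr hkk))
          refine ⟨⟨hdk, fun hm => hks ((PySem.Set.mem_add _ _ _).mpr (Or.inl hm))⟩, ?_⟩
          simp only [Bool.not_eq_true', beq_eq_false_iff_ne]
          exact hne
      | false =>
        have hnotK : projCC row ∉ K := fun hx => by
          rw [((hK _).mp hx).1] at hdb; cases hdb
        rw [if_neg hnotK]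
        simp only [Bool.false_and, Bool.false_eq_true, if_false]
        congr 1
        apply ih _ seen hlen'
        intro k
        rw [List.mem_filter, hK k]
        constructor
        · rintro ⟨⟨hdk, hks⟩, -⟩; exact ⟨hdk, hks⟩
        · rintro ⟨hdk, hks⟩
          refine ⟨⟨hdk, hks⟩, ?_⟩
          have hne : k ≠ projCC row := fun hkk => by
            rw [hkk] at hdk; rw [hdk] at hdb; cases hdb
          simp only [Bool.not_eq_true', beq_eq_false_iff_ne]
          exact hne

-- ===== VERDICT (by name: the statement is the Claim_ definition above) =====
theorem change_catagories_spec : Claim_equal_change_catagories := by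
  intro cat upd _ hPre
  unfold Spec_change_catagories change_catagories_alt
  rw [changeA_eq_foldl]
  rcases hPre with h | h
  · subst h
    have hkeys : (PySem.Dict.ofList ([] : List (String × String))).keys = [] := rfl
    have hnc : ∀ k, (PySem.Dict.ofList ([] : List (String × String))).contains k = false :=
      fun k => rfl
    rw [hkeys, goCC_of_no_key _ hnc]
    rfl
  · apply foldl_applyKey_eq_goCC _ cat _ _ h
    intro k
    simp [PySem.Dict.contains_iff_mem_keys, PySem.Set.empty]
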